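-- pv_equiv track=rewrite | github.com/NiruddeshJatra/DSA-Coding_Ninja_problems | Bit Manipulation/P183 - Single Number II.py | elementThatAppearsOnce
-- ===== SOURCE A (Python) =====
-- def elementThatAppearsOnce(arr):
--     ans = 0
--     for bitIndex in range(32):  # Iterate through all 32 bits
--         count = 0
--         for num in arr:  # Count numbers with the current bit set
--             if num & (1 << bitIndex):
--                 count += 1
--
--         # If the count is not divisible by 3, set the bit in the result
--         if count % 3 == 1:
--             ans |= (1 << bitIndex)
--
--     return ans
-- ===== SOURCE B (Python) =====
-- def elementThatAppearsOnce(arr):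
--     # Single pass with two bitwise accumulators: 'ones' holds the bits seen a
--     # number of times = 1 (mod 3), 'twos' the bits seen = 2 (mod 3).  The final
--     # mask keeps the low 32 bits, exactly the bits the task inspects.
--     ones, twos = 0, 0
--     for num in arr:
--         ones = (ones ^ num) & ~twos
--         twos = (twos ^ num) & ~ones
--     return ones & 0xFFFFFFFF
-- ===== Notes on version B (the rewrite author's own statement) =====
-- stated objective: faster
-- what changed: Replaces A's 32 per-bit counting passes over the array by a single pass that maintains the classic two bitwise accumulators ones/twos (bits seen 1 resp. 2 times mod 3), finishing with a 32-bit mask.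
import Mathlib
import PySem

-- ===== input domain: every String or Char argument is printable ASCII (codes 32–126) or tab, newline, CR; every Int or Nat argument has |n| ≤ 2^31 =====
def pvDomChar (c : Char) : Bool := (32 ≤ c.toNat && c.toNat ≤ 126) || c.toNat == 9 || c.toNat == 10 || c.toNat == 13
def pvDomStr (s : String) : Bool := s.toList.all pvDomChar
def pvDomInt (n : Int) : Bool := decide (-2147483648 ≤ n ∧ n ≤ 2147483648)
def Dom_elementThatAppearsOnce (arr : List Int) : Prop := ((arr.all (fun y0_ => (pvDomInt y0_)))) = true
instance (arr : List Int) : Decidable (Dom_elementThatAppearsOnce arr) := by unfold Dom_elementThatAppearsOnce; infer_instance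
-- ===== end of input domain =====

-- B replaces A's 32 per-bit counting passes by a single pass keeping two bitwise
-- accumulators (ones/twos trick), then masks to the low 32 bits; same return value.

-- ===== PORT A =====
-- bitIndex comes from range(32), so it is nonnegative: '1 <<< bitIndex.toNat' is exact for '1 << bitIndex'.
def elementThatAppearsOnce (arr : List Int) : Int :=
  (PySem.List.pyRange 0 32 1).foldl (fun ans bitIndex =>
    let count : Int := arr.foldl (fun count num =>
      if PySem.Int.band num (1 <<< bitIndex.toNat) ≠ 0 then count + 1 else count) 0
    if PySem.Int.mod count 3 = 1 then PySem.Int.bor ans (1 <<< bitIndex.toNat) else ans) 0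

-- ===== PORT B =====
-- Python '~x' is exactly '-x - 1' on ints; the fold state is the pair (ones, twos).
def elementThatAppearsOnce_alt (arr : List Int) : Int :=
  let st := arr.foldl (fun (p : Int × Int) num =>
    let ones := PySem.Int.band (PySem.Int.bxor p.1 num) (-p.2 - 1)
    let twos := PySem.Int.band (PySem.Int.bxor p.2 num) (-ones - 1)
    (ones, twos)) (0, 0)
  PySem.Int.band st.1 4294967295

-- ===== PRECONDITION & SPEC =====
def Spec_elementThatAppearsOnce (arr : List Int) (out : Int) : Prop := out = elementThatAppearsOnce_alt arr
instance (arr : List Int) (out : Int) : Decidable (Spec_elementThatAppearsOnce arr out) := by unfold Spec_elementThatAppearsOnce; infer_instance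

-- ===== CLAIM (what is proved, stated in full; the proofs are below) =====
def Claim_equal_elementThatAppearsOnce : Prop := ∀ (arr : List Int), Dom_elementThatAppearsOnce arr → Spec_elementThatAppearsOnce arr (elementThatAppearsOnce arr)

-- ===== LEMMAS AND PROOFS =====

-- Nat: ldiff is "subtract the common bits"
theorem pv_ldiff_div_two (m n : Nat) : Nat.ldiff m n / 2 = Nat.ldiff (m/2) (n/2) :=
  Nat.eq_of_testBit_eq (fun i => by
    simp [Nat.testBit_div_two, Nat.testBit_ldiff])

theorem pv_mod_two_eq_toNat (x : Nat) : x % 2 = (x.testBit 0).toNat := by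
  rw [Nat.testBit_zero]
  rcases Nat.mod_two_eq_zero_or_one x with h | h <;> simp [h]

theorem pv_ldiff_add_and (m n : Nat) : Nat.ldiff m n + (m &&& n) = m := by
  induction m using Nat.strong_induction_on generalizing n with
  | _ m ih =>
    rcases Nat.eq_zero_or_pos m with rfl | hpos
    · have h0 : Nat.ldiff 0 n = 0 :=
        Nat.eq_of_testBit_eq (fun i => by simp [Nat.testBit_ldiff])
      simp [h0]
    · have hlt : m / 2 < m := Nat.div_lt_self hpos one_lt_two
      have IH := ih (m/2) hlt (n/2)
      have e1 : Nat.ldiff m n = 2 * Nat.ldiff (m/2) (n/2) + Nat.ldiff m n % 2 := by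
        rw [← pv_ldiff_div_two]; omega
      have e2 : m &&& n = 2 * ((m/2) &&& (n/2)) + (m &&& n) % 2 := by
        rw [← Nat.and_div_two]; omega
      have p1 : Nat.ldiff m n % 2 = (m.testBit 0 && !n.testBit 0).toNat := by
        rw [pv_mod_two_eq_toNat, Nat.testBit_ldiff]
      have p2 : (m &&& n) % 2 = (m.testBit 0 && n.testBit 0).toNat := by
        rw [pv_mod_two_eq_toNat, Nat.testBit_and]
      have p3 : m % 2 = (m.testBit 0).toNat := pv_mod_two_eq_toNat m
      generalize (m / 2).ldiff (n / 2) = L' at *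
      generalize (m / 2) &&& (n / 2) = A' at *
      generalize Nat.ldiff m n = L at *
      generalize m &&& n = A at *
      cases hb : m.testBit 0 <;> cases hc : n.testBit 0 <;>
        (simp [hb, hc] at p1 p2 p3; omega)

theorem pv_sub_and (m n : Nat) : m - (m &&& n) = Nat.ldiff m n := by
  have := pv_ldiff_add_and m n; omega

-- Int.testBit on the two constructors
theorem pv_tb_coe (m : Nat) (i : Nat) : ((m : Int)).testBit i = m.testBit i := rfl

theorem pv_tb_negSucc (m : Nat) (i : Nat) : (Int.negSucc m).testBit i = !m.testBit i := rfl

theorem pv_neg_coe_sub_one (m : Nat) : (-(m : Int) - 1) = Int.negSucc m := by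
  rw [Int.negSucc_eq]; ring

theorem pv_neg_negSucc_sub_one (m : Nat) : (-(Int.negSucc m) - 1) = (m : Int) := by
  rw [Int.negSucc_eq]; ring

-- '-b - 1' is Python's '~b': bitwise complement
theorem pv_tb_not (b : Int) (i : Nat) : (-b - 1).testBit i = !b.testBit i := by
  cases b with
  | ofNat m => rw [show Int.ofNat m = (m : Int) from rfl, pv_neg_coe_sub_one]; rfl
  | negSucc m => rw [pv_neg_negSucc_sub_one]; simp [pv_tb_coe, pv_tb_negSucc]

-- Python '&' bit by bit
theorem pv_tb_band (a b : Int) (i : Nat) :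
    (PySem.Int.band a b).testBit i = (a.testBit i && b.testBit i) := by
  cases a with
  | ofNat m =>
    cases b with
    | ofNat n =>
      simp only [PySem.Int.band, Int.ofNat_eq_natCast]
      rw [if_pos (Int.natCast_nonneg m), if_pos (Int.natCast_nonneg n)]
      simp [pv_tb_coe, Nat.testBit_and]
    | negSucc n =>
      simp only [PySem.Int.band, Int.ofNat_eq_natCast]
      rw [if_pos (Int.natCast_nonneg m), if_neg (by omega), pv_neg_negSucc_sub_one]
      simp only [Int.toNat_natCast, pv_sub_and, pv_tb_coe, Nat.testBit_ldiff, pv_tb_negSucc]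
  | negSucc m =>
    cases b with
    | ofNat n =>
      simp only [PySem.Int.band, Int.ofNat_eq_natCast]
      rw [if_neg (by omega), if_pos (Int.natCast_nonneg n), pv_neg_negSucc_sub_one]
      simp only [Int.toNat_natCast, pv_sub_and, pv_tb_coe, Nat.testBit_ldiff, pv_tb_negSucc]
      rw [Bool.and_comm]
    | negSucc n =>
      simp only [PySem.Int.band]
      rw [if_neg (by omega), if_neg (by omega), pv_neg_negSucc_sub_one, pv_neg_negSucc_sub_one]
      rw [pv_neg_coe_sub_one]
      simp [pv_tb_negSucc, Int.toNat_natCast, Nat.testBit_or]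

-- Python '^' bit by bit
theorem pv_tb_bxor (a b : Int) (i : Nat) :
    (PySem.Int.bxor a b).testBit i = (a.testBit i ^^ b.testBit i) := by
  cases a with
  | ofNat m =>
    cases b with
    | ofNat n =>
      simp only [PySem.Int.bxor, Int.ofNat_eq_natCast]
      rw [if_pos (Int.natCast_nonneg m), if_pos (Int.natCast_nonneg n)]
      simp [pv_tb_coe, Nat.testBit_xor]
    | negSucc n =>
      simp only [PySem.Int.bxor, Int.ofNat_eq_natCast]
      rw [if_pos (Int.natCast_nonneg m), if_neg (by omega), pv_neg_negSucc_sub_one]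
      rw [Int.toNat_natCast, pv_neg_coe_sub_one]
      simp [pv_tb_negSucc, pv_tb_coe, Nat.testBit_xor]
  | negSucc m =>
    cases b with
    | ofNat n =>
      simp only [PySem.Int.bxor, Int.ofNat_eq_natCast]
      rw [if_neg (by omega), if_pos (Int.natCast_nonneg n), pv_neg_negSucc_sub_one]
      rw [Int.toNat_natCast, pv_neg_coe_sub_one]
      simp [pv_tb_negSucc, pv_tb_coe, Nat.testBit_xor]
    | negSucc n =>
      simp only [PySem.Int.bxor]
      rw [if_neg (by omega), if_neg (by omega), pv_neg_negSucc_sub_one, pv_neg_negSucc_sub_one]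
      simp only [Int.toNat_natCast, pv_tb_coe, pv_tb_negSucc, Nat.testBit_xor]
      cases m.testBit i <;> cases n.testBit i <;> rfl

-- '1 << b': in port A '1 <<< bitIndex.toNat' elaborates at Nat and is cast to Int
theorem pv_shift (b : Nat) : (((1 <<< b : Nat)) : Int) = ((2^b : Nat) : Int) := by
  rw [Nat.one_shiftLeft]

-- A's bit test: 'num & (1 << b)' is nonzero exactly when bit b of num is set
theorem pv_band_pow (a : Int) (b : Nat) :
    PySem.Int.band a ((2^b : Nat) : Int) = if a.testBit b then ((2^b : Nat) : Int) else 0 := by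
  cases a with
  | ofNat m =>
    simp only [PySem.Int.band, Int.ofNat_eq_natCast]
    rw [if_pos (Int.natCast_nonneg m), if_pos (Int.natCast_nonneg _)]
    simp only [Int.toNat_natCast, Nat.and_two_pow, pv_tb_coe]
    split_ifs with h <;> simp [h]
  | negSucc m =>
    simp only [PySem.Int.band]
    rw [if_neg (by omega), if_pos (Int.natCast_nonneg _), pv_neg_negSucc_sub_one]
    simp only [Int.toNat_natCast, Nat.two_pow_and, pv_tb_negSucc]
    split_ifs with h <;> simp at h <;> simp [h]

theorem pv_pred_eq (b : Nat) :
    (fun num : Int => decide (PySem.Int.band num (((1 <<< b : Nat)) : Int) ≠ 0)) = (fun num : Int => num.testBit b) := by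
  funext num
  rw [pv_shift, pv_band_pow]
  cases h : num.testBit b <;> simp [h]

-- the per-bit "count is 1 (mod 3)" condition both programs decide
def pvCond (arr : List Int) (b : Nat) : Bool := decide ((arr.countP (fun num => num.testBit b)) % 3 = 1)

-- A's or-accumulation, mirrored on Nat
theorem pv_foldOr_cast (g : Nat → Bool) (n s : Nat) :
    (List.range n).foldl (fun (t : Int) k => if g k then PySem.Int.bor t ((2^k : Nat) : Int) else t) (s : Int)
      = (((List.range n).foldl (fun t k => if g k then t ||| 2^k else t) s : Nat) : Int) := by
  induction n generalizing s with
  | zero => simp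
  | succ n ih =>
    rw [List.range_succ, List.foldl_append, List.foldl_append, ih]
    simp only [List.foldl_cons, List.foldl_nil]
    cases hg : g n <;>
      simp only [hg, Bool.false_eq_true, if_false, if_true, PySem.Int.bor_natCast]

theorem pv_foldOr_testBit (g : Nat → Bool) (n s j : Nat) :
    ((List.range n).foldl (fun t k => if g k then t ||| 2^k else t) s).testBit j
      = (s.testBit j || (decide (j < n) && g j)) := by
  induction n generalizing s with
  | zero => simp
  | succ n ih =>
    rw [List.range_succ, List.foldl_append]
    simp only [List.foldl_cons, List.foldl_nil]
    by_cases hj : j = n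
    · subst hj
      cases hg : g j <;> simp [hg, ih, Nat.testBit_or, Nat.testBit_two_pow]
    · have h1 : (2^n).testBit j = false := by
        rw [Nat.testBit_two_pow]; simp [Ne.symm hj]
      have h2 : decide (j ≤ n) = decide (j < n) := by
        simp only [decide_eq_decide]; omega
      cases hg : g n <;> simp [hg, ih, Nat.testBit_or, h1, h2]

-- A computes the or over bits 0..31 of 2^b for each b with count % 3 = 1
theorem pv_A_eq (arr : List Int) :
    elementThatAppearsOnce arr
      = (((List.range 32).foldl (fun t k => if pvCond arr k then t ||| 2^k else t) 0 : Nat) : Int) := by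
  unfold elementThatAppearsOnce
  rw [show PySem.List.pyRange 0 32 1 = PySem.List.pyRange 0 ((32:Nat):Int) 1 from rfl]
  rw [show PySem.List.pyRange 0 ((32:Nat):Int) 1 = PySem.List.pyRange 0 ((32:Nat):Int) from rfl]
  rw [PySem.List.pyRange_zero_natCast, List.foldl_map]
  have hfun : ∀ (t : Int) (k : Nat),
      (fun (ans : Int) (bitIndex : Int) =>
        let count : Int := arr.foldl (fun count num =>
          if PySem.Int.band num (1 <<< bitIndex.toNat) ≠ 0 then count + 1 else count) 0
        if PySem.Int.mod count 3 = 1 then PySem.Int.bor ans (1 <<< bitIndex.toNat) else ans) t ((k : Int))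
      = (fun (t : Int) (k : Nat) => if pvCond arr k then PySem.Int.bor t ((2^k : Nat) : Int) else t) t k := by
    intro t k
    dsimp only
    have hcnt : arr.foldl (fun count num =>
        if PySem.Int.band num (((1 <<< ((k:Int)).toNat : Nat)) : Int) ≠ 0 then count + 1 else count) (0:Int)
        = ((arr.countP (fun num => num.testBit ((k:Int)).toNat) : Nat) : Int) := by
      have := PySem.List.foldl_count_if (fun num : Int => decide (PySem.Int.band num (((1 <<< ((k:Int)).toNat : Nat)) : Int) ≠ 0)) arr 0
      simp only [decide_eq_true_eq] at this
      rw [this, pv_pred_eq ((k:Int)).toNat]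
      simp
    rw [hcnt]
    simp only [Int.toNat_natCast]
    have hmod : PySem.Int.mod ((arr.countP (fun num => num.testBit k) : Nat) : Int) 3
        = (((arr.countP (fun num => num.testBit k)) % 3 : Nat) : Int) := by
      exact_mod_cast PySem.Int.mod_natCast _ 3
    rw [hmod, pv_shift]
    simp only [Nat.cast_eq_one, pvCond]
    by_cases hc : (arr.countP (fun num => num.testBit k)) % 3 = 1 <;> simp [hc]
  calc (List.range 32).foldl _ (0:Int)
      = (List.range 32).foldl (fun (t : Int) (k : Nat) => if pvCond arr k then PySem.Int.bor t ((2^k : Nat) : Int) else t) ((0:Nat) : Int) := by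
        apply PySem.List.foldl_congr_mem
        intro t k _
        exact hfun t k
    _ = _ := pv_foldOr_cast (pvCond arr) 32 0

-- B's single pass: bit i of 'ones' says count ≡ 1, bit i of 'twos' says count ≡ 2 (mod 3)
theorem pv_B_inv (l : List Int) (c : Nat → Nat) (s : Int × Int)
    (hs : ∀ i, s.1.testBit i = decide (c i % 3 = 1) ∧ s.2.testBit i = decide (c i % 3 = 2)) :
    ∀ i,
      (l.foldl (fun (p : Int × Int) num =>
        let ones := PySem.Int.band (PySem.Int.bxor p.1 num) (-p.2 - 1)
        let twos := PySem.Int.band (PySem.Int.bxor p.2 num) (-ones - 1)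
        (ones, twos)) s).1.testBit i
        = decide ((c i + l.countP (fun num => num.testBit i)) % 3 = 1)
      ∧ (l.foldl (fun (p : Int × Int) num =>
        let ones := PySem.Int.band (PySem.Int.bxor p.1 num) (-p.2 - 1)
        let twos := PySem.Int.band (PySem.Int.bxor p.2 num) (-ones - 1)
        (ones, twos)) s).2.testBit i
        = decide ((c i + l.countP (fun num => num.testBit i)) % 3 = 2) := by
  induction l generalizing c s with
  | nil => intro i; simpa using hs i
  | cons x t ih =>
    simp only [List.foldl_cons]
    have hstep : ∀ i,
        ((PySem.Int.band (PySem.Int.bxor s.1 x) (-s.2 - 1),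
          PySem.Int.band (PySem.Int.bxor s.2 x) (-(PySem.Int.band (PySem.Int.bxor s.1 x) (-s.2 - 1)) - 1)) : Int × Int).1.testBit i
          = decide ((c i + (if x.testBit i then 1 else 0)) % 3 = 1)
        ∧ ((PySem.Int.band (PySem.Int.bxor s.1 x) (-s.2 - 1),
          PySem.Int.band (PySem.Int.bxor s.2 x) (-(PySem.Int.band (PySem.Int.bxor s.1 x) (-s.2 - 1)) - 1)) : Int × Int).2.testBit i
          = decide ((c i + (if x.testBit i then 1 else 0)) % 3 = 2) := by
      intro i
      obtain ⟨h1, h2⟩ := hs i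
      have hk : c i % 3 = 0 ∨ c i % 3 = 1 ∨ c i % 3 = 2 := by omega
      simp only [pv_tb_band, pv_tb_bxor, pv_tb_not, h1, h2]
      rcases hk with hk | hk | hk <;>
        cases hx : x.testBit i <;>
          simp [hk, hx] <;> omega
    have := ih (fun i => c i + (if x.testBit i then 1 else 0))
      (PySem.Int.band (PySem.Int.bxor s.1 x) (-s.2 - 1),
       PySem.Int.band (PySem.Int.bxor s.2 x) (-(PySem.Int.band (PySem.Int.bxor s.1 x) (-s.2 - 1)) - 1))
      hstep
    intro i
    have h := this i
    have harg : ∀ r : Nat, ((c i + (x :: t).countP (fun num => num.testBit i)) % 3 = r)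
        ↔ (((c i + (if x.testBit i then 1 else 0)) + t.countP (fun num => num.testBit i)) % 3 = r) := by
      intro r
      rw [List.countP_cons]
      cases hx : x.testBit i <;> simp <;> omega
    exact ⟨h.1.trans (decide_eq_decide.mpr (harg 1).symm),
           h.2.trans (decide_eq_decide.mpr (harg 2).symm)⟩

-- masking with 0xFFFFFFFF keeps exactly bits 0..31
theorem pv_band_mask (a : Int) :
    ∃ N : Nat, PySem.Int.band a ((2^32 - 1 : Nat) : Int) = (N : Int)
      ∧ ∀ j, N.testBit j = (decide (j < 32) && a.testBit j) := by
  cases a with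
  | ofNat m =>
    refine ⟨m &&& (2^32 - 1), ?_, ?_⟩
    · exact PySem.Int.band_natCast m (2^32 - 1)
    · intro j
      rw [Nat.testBit_and, Nat.testBit_two_pow_sub_one, Bool.and_comm]
      rfl
  | negSucc m =>
    refine ⟨Nat.ldiff (2^32 - 1) m, ?_, ?_⟩
    · simp only [PySem.Int.band]
      rw [if_neg (by omega), if_pos (Int.natCast_nonneg _), pv_neg_negSucc_sub_one]
      simp [pv_sub_and]
    · intro j
      rw [Nat.testBit_ldiff, Nat.testBit_two_pow_sub_one, pv_tb_negSucc]

-- ===== VERDICT (by name: the statement is the Claim_ definition above) =====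
theorem elementThatAppearsOnce_spec : Claim_equal_elementThatAppearsOnce := by
  intro arr _
  show elementThatAppearsOnce arr = elementThatAppearsOnce_alt arr
  rw [pv_A_eq]
  unfold elementThatAppearsOnce_alt
  have hzero : ∀ i : Nat, (0 : Int).testBit i = decide ((fun _ : Nat => 0) i % 3 = 1)
      ∧ (0 : Int).testBit i = decide ((fun _ : Nat => 0) i % 3 = 2) := by
    intro i
    constructor <;> simp [show (0:Int).testBit i = Nat.testBit 0 i from rfl]
  have hinv := pv_B_inv arr (fun _ => 0) (0, 0) (fun i => hzero i)
  obtain ⟨N, hval, htb⟩ := pv_band_mask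
    ((arr.foldl (fun (p : Int × Int) num =>
      let ones := PySem.Int.band (PySem.Int.bxor p.1 num) (-p.2 - 1)
      let twos := PySem.Int.band (PySem.Int.bxor p.2 num) (-ones - 1)
      (ones, twos)) (0, 0)).1)
  show _ = PySem.Int.band
    ((arr.foldl (fun (p : Int × Int) num =>
      let ones := PySem.Int.band (PySem.Int.bxor p.1 num) (-p.2 - 1)
      let twos := PySem.Int.band (PySem.Int.bxor p.2 num) (-ones - 1)
      (ones, twos)) (0, 0)).1) 4294967295
  rw [show ((4294967295 : Int)) = ((2^32 - 1 : Nat) : Int) by norm_num]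
  rw [hval]
  congr 1
  apply Nat.eq_of_testBit_eq
  intro j
  rw [pv_foldOr_testBit, htb, (hinv j).1]
  simp [pvCond]
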